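-- pv_equiv track=rewrite | github.com/mtn-lark/AdventOfCode2023 | Day5/if_you_give_a_seed_a_fertilizer.py | merge_map
-- ===== SOURCE A (Python) =====
-- from typing import List, Tuple, Dict
--
-- def merge_map(
--     left: List[Tuple[int, int, int]], right: List[Tuple[int, int, int]]
-- ) -> List[Tuple[int, int, int]]:
--     """Merges two sorted maps (based on second item of tuple) into one sorted map.
--     Maps are organized (destination range start, source range start, range length).
--
--     Args:
--         left (List[Tuple[int, int, int]]): Left sorted map
--         right (List[Tuple[int, int, int]]): Right sorted map
--
--     Returns:
--         List[Tuple[int, int, int]]: Merged sorted map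
--     """
--
--     li = 0  # Left pointer index
--     ri = 0  # Right pointer index
--
--     new_list = []
--     while li < len(left) and ri < len(right):
--         if left[li][1] <= right[ri][1]:
--             new_list.append(left[li])
--             li += 1
--         else:
--             # right[ri] < left[li]
--             new_list.append(right[ri])
--             ri += 1
--
--     # If there are any more items in left, merge items
--     while li < len(left):
--         new_list.append(left[li])
--         li += 1
--
--     # If there are any more items in right, merge items
--     while ri < len(right):
--         new_list.append(right[ri])
--         ri += 1
--
--     return new_list
-- ===== SOURCE B (Python) =====
-- def merge_map(left, right):
--     out = []
--     while left and right:
--         rh = right[0][1]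
--         i = 0
--         n = len(left)
--         while i < n and left[i][1] <= rh:
--             i += 1
--         if i:
--             out += left[:i]
--             left = left[i:]
--         else:
--             lh = left[0][1]
--             j = 0
--             m = len(right)
--             while j < m and right[j][1] < lh:
--                 j += 1
--             out += right[:j]
--             right = right[j:]
--     return out + left + right
-- ===== Notes on version B (the rewrite author's own statement) =====
-- stated objective: alternative
-- what changed: The element-at-a-time two-pointer merge with index counters and separate leftover loops is replaced by a run-based merge: repeatedly scan the maximal run of the active list that precedes the other list's head and move that whole run into the output as one slice, rebinding each list to its suffix; the leftovers are handled by a single concatenation.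
import Mathlib
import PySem

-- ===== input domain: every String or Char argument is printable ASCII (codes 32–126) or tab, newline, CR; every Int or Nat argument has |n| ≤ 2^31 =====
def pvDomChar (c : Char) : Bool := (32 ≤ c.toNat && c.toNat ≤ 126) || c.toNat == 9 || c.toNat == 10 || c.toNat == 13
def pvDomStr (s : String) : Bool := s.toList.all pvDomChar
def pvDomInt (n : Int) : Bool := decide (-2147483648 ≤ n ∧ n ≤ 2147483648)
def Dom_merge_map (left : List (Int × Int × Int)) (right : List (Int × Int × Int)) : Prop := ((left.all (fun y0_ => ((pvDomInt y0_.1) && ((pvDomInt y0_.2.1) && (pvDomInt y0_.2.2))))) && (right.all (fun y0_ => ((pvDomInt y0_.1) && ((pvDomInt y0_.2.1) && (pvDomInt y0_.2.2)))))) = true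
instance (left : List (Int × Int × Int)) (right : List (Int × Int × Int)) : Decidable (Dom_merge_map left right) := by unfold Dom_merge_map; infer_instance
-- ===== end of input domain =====

-- B replaces the element-at-a-time two-pointer merge (three while loops over
-- index counters) by a run-based merge that moves whole runs as slices
-- (alternative decomposition, same asymptotic cost).

-- ===== PORT A =====
-- first while loop: both pointers in range; returns (new_list, li, ri)
def mmLoop1 (left right : List (Int × Int × Int)) (li ri : Nat)
    (acc : List (Int × Int × Int)) : List (Int × Int × Int) × Nat × Nat :=
  if h : li < left.length ∧ ri < right.length then
    if (left[li]'h.1).2.1 ≤ (right[ri]'h.2).2.1 then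
      mmLoop1 left right (li + 1) ri (acc ++ [left[li]'h.1])
    else
      mmLoop1 left right li (ri + 1) (acc ++ [right[ri]'h.2])
  else (acc, li, ri)
termination_by (left.length - li) + (right.length - ri)
decreasing_by all_goals omega

-- the two identical leftover while loops ("while i < len(xs): append xs[i]; i += 1")
def mmTail (xs : List (Int × Int × Int)) (i : Nat)
    (acc : List (Int × Int × Int)) : List (Int × Int × Int) :=
  if h : i < xs.length then mmTail xs (i + 1) (acc ++ [xs[i]'h]) else acc
termination_by xs.length - i

def merge_map (left : List (Int × Int × Int)) (right : List (Int × Int × Int)) : List (Int × Int × Int) :=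
  let m := mmLoop1 left right 0 0 []
  mmTail right m.2.2 (mmTail left m.2.1 m.1)

-- ===== PORT B =====
-- inner scan "while i < n and left[i][1] <= rh: i += 1" (run length)
def altScanL : List (Int × Int × Int) → Int → Nat
  | [], _ => 0
  | a :: l, rh => if a.2.1 ≤ rh then altScanL l rh + 1 else 0

-- inner scan "while j < m and right[j][1] < lh: j += 1" (run length)
def altScanR : List (Int × Int × Int) → Int → Nat
  | [], _ => 0
  | b :: r, lh => if b.2.1 < lh then altScanR r lh + 1 else 0

lemma altScanR_pos (b : Int × Int × Int) (r : List (Int × Int × Int)) (lh : Int)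
    (h : b.2.1 < lh) : 0 < altScanR (b :: r) lh := by
  simp [altScanR, h]

-- outer "while left and right" loop, with left/right rebound to their suffixes
def altLoop (out left right : List (Int × Int × Int)) : List (Int × Int × Int) :=
  match left, right with
  | [], _ => out ++ left ++ right
  | _ :: _, [] => out ++ left ++ right
  | a :: l, b :: r =>
    -- rh := b.2.1 (right head key), i := run length on the left
    if hi : altScanL (a :: l) b.2.1 ≠ 0 then
      altLoop (out ++ (a :: l).take (altScanL (a :: l) b.2.1))
        ((a :: l).drop (altScanL (a :: l) b.2.1)) (b :: r)
    else
      -- lh := a.2.1 (left head key), j := run length on the right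
      altLoop (out ++ (b :: r).take (altScanR (b :: r) a.2.1)) (a :: l)
        ((b :: r).drop (altScanR (b :: r) a.2.1))
termination_by left.length + right.length
decreasing_by
  · simp only [List.length_drop, List.length_cons]
    omega
  · have hi0 : altScanL (a :: l) b.2.1 = 0 := not_ne_iff.mp hi
    have hba : b.2.1 < a.2.1 := by
      by_contra hba
      simp [altScanL, not_lt.mp hba] at hi0
    have h1 : 0 < altScanR (b :: r) a.2.1 := altScanR_pos b r a.2.1 hba
    simp only [List.length_drop, List.length_cons]
    omega

def merge_map_alt (left : List (Int × Int × Int)) (right : List (Int × Int × Int)) : List (Int × Int × Int) :=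
  altLoop [] left right

-- ===== PRECONDITION & SPEC =====
def Spec_merge_map (left : List (Int × Int × Int)) (right : List (Int × Int × Int)) (out : List (Int × Int × Int)) : Prop := out = merge_map_alt left right
instance (left : List (Int × Int × Int)) (right : List (Int × Int × Int)) (out : List (Int × Int × Int)) : Decidable (Spec_merge_map left right out) := by unfold Spec_merge_map; infer_instance

-- ===== CLAIM (what is proved, stated in full; the proofs are below) =====
def Claim_equal_merge_map : Prop := ∀ (left : List (Int × Int × Int)) (right : List (Int × Int × Int)), Dom_merge_map left right → Spec_merge_map left right (merge_map left right)

-- ===== LEMMAS AND PROOFS =====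

-- the natural recursive merge, intermediary between the two ports
def mrg : List (Int × Int × Int) → List (Int × Int × Int) → List (Int × Int × Int)
  | [], r => r
  | a :: l, [] => a :: l
  | a :: l, b :: r =>
      if a.2.1 ≤ b.2.1 then a :: mrg l (b :: r) else b :: mrg (a :: l) r
termination_by l r => l.length + r.length

lemma mrg_nil (l : List (Int × Int × Int)) : mrg l [] = l := by
  cases l <;> simp [mrg]

lemma mrg_cons_cons (a : Int × Int × Int) (l : List (Int × Int × Int))
    (b : Int × Int × Int) (r : List (Int × Int × Int)) :
    mrg (a :: l) (b :: r)
      = if a.2.1 ≤ b.2.1 then a :: mrg l (b :: r) else b :: mrg (a :: l) r := by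
  rw [mrg]

lemma mmTail_eq (xs : List (Int × Int × Int)) (i : Nat) (acc : List (Int × Int × Int)) :
    mmTail xs i acc = acc ++ xs.drop i := by
  fun_induction mmTail xs i acc with
  | case1 i acc h ih =>
      rw [ih, ← List.getElem_cons_drop h]
      simp
  | case2 i acc h =>
      rw [List.drop_eq_nil_of_le (by omega), List.append_nil]

lemma mmLoop1_eq (left right : List (Int × Int × Int)) (li ri : Nat)
    (acc : List (Int × Int × Int)) :
    mmTail right (mmLoop1 left right li ri acc).2.2
      (mmTail left (mmLoop1 left right li ri acc).2.1 (mmLoop1 left right li ri acc).1)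
    = acc ++ mrg (left.drop li) (right.drop ri) := by
  fun_induction mmLoop1 left right li ri acc with
  | case1 li ri acc h hle ih =>
      rw [← List.getElem_cons_drop h.1, ← List.getElem_cons_drop h.2,
        mrg_cons_cons, if_pos hle, List.getElem_cons_drop h.2]
      simpa [List.append_assoc] using ih
  | case2 li ri acc h hle ih =>
      rw [← List.getElem_cons_drop h.1, ← List.getElem_cons_drop h.2,
        mrg_cons_cons, if_neg hle, List.getElem_cons_drop h.1]
      simpa [List.append_assoc] using ih
  | case3 li ri acc h =>
      simp only [mmTail_eq]
      rcases Nat.lt_or_ge li left.length with hl | hl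
      · have : right.drop ri = [] := List.drop_eq_nil_of_le (by omega)
        rw [this, mrg_nil, List.append_assoc, List.append_nil]
      · have : left.drop li = [] := List.drop_eq_nil_of_le hl
        rw [this]
        simp [mrg]

lemma merge_map_eq_mrg (left right : List (Int × Int × Int)) :
    merge_map left right = mrg left right := by
  have := mmLoop1_eq left right 0 0 []
  simpa [merge_map] using this

-- the merge peels off the whole left run below (or tied with) the right head
lemma mrg_chunkL (b : Int × Int × Int) (r : List (Int × Int × Int)) :
    ∀ left : List (Int × Int × Int),
      mrg left (b :: r)
        = left.take (altScanL left b.2.1) ++ mrg (left.drop (altScanL left b.2.1)) (b :: r) := by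
  intro left
  induction left with
  | nil => simp [altScanL]
  | cons a l ih =>
      by_cases hab : a.2.1 ≤ b.2.1
      · rw [mrg_cons_cons, if_pos hab]
        simp only [altScanL, hab, if_true, List.take_succ_cons, List.drop_succ_cons]
        rw [ih]
        simp
      · rw [mrg_cons_cons, if_neg hab]
        simp only [altScanL, hab, if_false]
        rw [List.take_zero, List.drop_zero, List.nil_append, mrg_cons_cons, if_neg hab]

-- symmetrically, the whole right run strictly below the left head
lemma mrg_chunkR (a : Int × Int × Int) (l : List (Int × Int × Int)) :
    ∀ right : List (Int × Int × Int),
      mrg (a :: l) right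
        = right.take (altScanR right a.2.1) ++ mrg (a :: l) (right.drop (altScanR right a.2.1)) := by
  intro right
  induction right with
  | nil => simp [altScanR]
  | cons b r ih =>
      by_cases hba : b.2.1 < a.2.1
      · rw [mrg_cons_cons, if_neg (not_le.mpr hba)]
        simp only [altScanR, hba, if_true, List.take_succ_cons, List.drop_succ_cons]
        rw [ih]
        simp
      · simp only [altScanR, hba, if_false]
        rw [List.take_zero, List.drop_zero, List.nil_append]

lemma altLoop_eq (out left right : List (Int × Int × Int)) :
    altLoop out left right = out ++ mrg left right := by
  fun_induction altLoop out left right with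
  | case1 out right => simp [mrg]
  | case2 out a l => simp [mrg_nil]
  | case3 out a l b r hi ih =>
      rw [ih, List.append_assoc, ← mrg_chunkL b r (a :: l)]
  | case4 out a l b r hi ih =>
      rw [ih, List.append_assoc, ← mrg_chunkR a l (b :: r)]

-- ===== VERDICT (by name: the statement is the Claim_ definition above) =====
theorem merge_map_spec : Claim_equal_merge_map := by
  intro left right _
  unfold Spec_merge_map merge_map_alt
  rw [altLoop_eq, List.nil_append, merge_map_eq_mrg]
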